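-- pv_equiv track=rewrite | github.com/lork6/go3.0 | eredmeny1.py | Coord_bealitas
-- ===== SOURCE A (Python) =====
-- def Coord_bealitas(coordlist,szinlist,coord):
--     """itt  állitom be a koordinátákat nyolc írányba"""
--     SzinCoord = []
--     SCoordY = coord[0]  # itt állitom be a kezö jelenlegi coordinátákat
--     SCoordX = coord[1]
--     # beálitom a négy írányt
--     coord_list = [[SCoordY+1,SCoordX],
--                             [SCoordY,SCoordX+1], [SCoordY-1,SCoordX],[SCoordY,SCoordX-1]]
--     # itt töltöm ki a SzinCoordináta nevezetü lisámat a megfelelö szinekel a coordniátákhoz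
--     for i in range(0, len(coord_list)):
--         if coord_list[i] in coordlist:
--             for j in range(0, len(coordlist)):
--                 if coord_list[i] == coordlist[j]:
--                     SzinCoord.append(szinlist[j])
--         else:  # idde akkor jutt be ha az adott koordinátához nem tartozik szin(fekete vagy fehér)és "n" jelölöm
--             SzinCoord.append("n")
--
--     return coord_list, SzinCoord
-- ===== SOURCE B (Python) =====
-- def Coord_bealitas(coordlist, szinlist, coord):
--     """One pass over coordlist that dispatches each color into one of four buckets
--     (the four neighbors are pairwise distinct coordinates, so at most one branch fires);
--     empty buckets become ["n"] at the end."""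
--     y, x = coord[0], coord[1]
--     n0 = [y + 1, x]
--     n1 = [y, x + 1]
--     n2 = [y - 1, x]
--     n3 = [y, x - 1]
--     b0, b1, b2, b3 = [], [], [], []
--     for j in range(len(coordlist)):
--         c = coordlist[j]
--         if c == n0:
--             b0.append(szinlist[j])
--         elif c == n1:
--             b1.append(szinlist[j])
--         elif c == n2:
--             b2.append(szinlist[j])
--         elif c == n3:
--             b3.append(szinlist[j])
--     SzinCoord = (b0 or ["n"]) + (b1 or ["n"]) + (b2 or ["n"]) + (b3 or ["n"])
--     return [n0, n1, n2, n3], SzinCoord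
-- ===== Notes on version B (the rewrite author's own statement) =====
-- stated objective: alternative
-- what changed: Replaces A's loop over the 4 neighbors with a per-neighbor membership test and inner rescan of coordlist by a single pass over coordlist that dispatches each color into one of four buckets (the neighbors are pairwise distinct), empty buckets becoming ["n"].
import Mathlib
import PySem

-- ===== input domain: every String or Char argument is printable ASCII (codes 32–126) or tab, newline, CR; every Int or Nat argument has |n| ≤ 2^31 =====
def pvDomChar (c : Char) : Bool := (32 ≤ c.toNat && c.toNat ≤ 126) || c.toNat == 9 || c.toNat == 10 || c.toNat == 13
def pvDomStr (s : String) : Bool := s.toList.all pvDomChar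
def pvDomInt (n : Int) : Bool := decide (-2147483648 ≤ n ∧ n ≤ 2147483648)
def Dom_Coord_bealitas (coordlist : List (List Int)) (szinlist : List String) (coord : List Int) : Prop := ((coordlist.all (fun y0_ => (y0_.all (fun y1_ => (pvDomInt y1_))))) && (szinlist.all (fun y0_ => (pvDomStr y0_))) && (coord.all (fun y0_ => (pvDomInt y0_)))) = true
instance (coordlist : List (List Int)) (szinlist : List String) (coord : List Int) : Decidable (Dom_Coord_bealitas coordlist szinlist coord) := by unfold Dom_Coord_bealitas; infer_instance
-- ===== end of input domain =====

-- B replaces A's loop over the 4 neighbors with an inner rescan of coordlist by ONE pass over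
-- coordlist dispatching each color into one of four buckets (the four neighbors are pairwise
-- distinct), empty buckets becoming ["n"] (alternative decomposition; return value only).

-- ===== PORT A =====
def Coord_bealitas (coordlist : List (List Int)) (szinlist : List String) (coord : List Int) : List (List Int) × List String :=
  -- coord[0] / coord[1]: IndexError (coord shorter than 2) is excluded by Pre_
  let SCoordY := (PySem.List.pyGet? coord 0).getD 0
  let SCoordX := (PySem.List.pyGet? coord 1).getD 0
  let coord_list : List (List Int) :=
    [[SCoordY + 1, SCoordX], [SCoordY, SCoordX + 1], [SCoordY - 1, SCoordX], [SCoordY, SCoordX - 1]]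
  let SzinCoord : List String :=
    (PySem.List.pyRange 0 (PySem.List.len coord_list)).foldl (fun acc i =>
      let ci := PySem.List.pyGetD coord_list i []
      if ci ∈ coordlist then
        (PySem.List.pyRange 0 (PySem.List.len coordlist)).foldl (fun acc2 j =>
          -- szinlist[j]: IndexError (a matching j beyond szinlist) is excluded by Pre_
          if ci = PySem.List.pyGetD coordlist j [] then acc2 ++ [PySem.List.pyGetD szinlist j ""] else acc2) acc
      else acc ++ ["n"]) []
  (coord_list, SzinCoord)

-- ===== PORT B =====
def Coord_bealitas_alt (coordlist : List (List Int)) (szinlist : List String) (coord : List Int) : List (List Int) × List String :=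
  let y := (PySem.List.pyGet? coord 0).getD 0
  let x := (PySem.List.pyGet? coord 1).getD 0
  let n0 : List Int := [y + 1, x]
  let n1 : List Int := [y, x + 1]
  let n2 : List Int := [y - 1, x]
  let n3 : List Int := [y, x - 1]
  -- one pass over range(len(coordlist)); szinlist[j] raising beyond szinlist is excluded by Pre_
  let bs : List String × List String × List String × List String :=
    (PySem.List.pyRange 0 (PySem.List.len coordlist)).foldl (fun b j =>
      let c := PySem.List.pyGetD coordlist j []
      let s := PySem.List.pyGetD szinlist j ""
      if c = n0 then (b.1 ++ [s], b.2.1, b.2.2.1, b.2.2.2)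
      else if c = n1 then (b.1, b.2.1 ++ [s], b.2.2.1, b.2.2.2)
      else if c = n2 then (b.1, b.2.1, b.2.2.1 ++ [s], b.2.2.2)
      else if c = n3 then (b.1, b.2.1, b.2.2.1, b.2.2.2 ++ [s])
      else b) ([], [], [], [])
  -- 'b or ["n"]'
  let orn : List String → List String := fun b => if b = [] then ["n"] else b
  ([n0, n1, n2, n3], orn bs.1 ++ orn bs.2.1 ++ orn bs.2.2.1 ++ orn bs.2.2.2)

-- ===== PRECONDITION & SPEC =====
-- the four neighbor coordinates of `coord` (used only to state Pre_)
def pvNbrs (coord : List Int) : List (List Int) :=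
  [[coord.getD 0 0 + 1, coord.getD 1 0], [coord.getD 0 0, coord.getD 1 0 + 1],
   [coord.getD 0 0 - 1, coord.getD 1 0], [coord.getD 0 0, coord.getD 1 0 - 1]]

-- Pre_ excludes exactly the inputs on which A raises IndexError: coord shorter than 2 entries
-- (coord[1] raises), and inputs where some neighbor coordinate occurs in coordlist at an index
-- ≥ len(szinlist) (szinlist[j] raises there).
def Pre_Coord_bealitas (coordlist : List (List Int)) (szinlist : List String) (coord : List Int) : Prop :=
  2 ≤ coord.length ∧
  ∀ j ∈ List.range coordlist.length, szinlist.length ≤ j → coordlist.getD j [] ∉ pvNbrs coord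
instance (coordlist : List (List Int)) (szinlist : List String) (coord : List Int) : Decidable (Pre_Coord_bealitas coordlist szinlist coord) := by unfold Pre_Coord_bealitas; infer_instance

def pvWitness_Coord_bealitas : List (List Int) × List String × List Int := ([[1, 0]], ["f"], [0, 0])

def Spec_Coord_bealitas (coordlist : List (List Int)) (szinlist : List String) (coord : List Int) (out : List (List Int) × List String) : Prop := out = Coord_bealitas_alt coordlist szinlist coord
instance (coordlist : List (List Int)) (szinlist : List String) (coord : List Int) (out : List (List Int) × List String) : Decidable (Spec_Coord_bealitas coordlist szinlist coord out) := by unfold Spec_Coord_bealitas; infer_instance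

-- ===== CLAIM (what is proved, stated in full; the proofs are below) =====
def Claim_equal_Coord_bealitas : Prop := ∀ (coordlist : List (List Int)) (szinlist : List String) (coord : List Int), Dom_Coord_bealitas coordlist szinlist coord → Pre_Coord_bealitas coordlist szinlist coord → Spec_Coord_bealitas coordlist szinlist coord (Coord_bealitas coordlist szinlist coord)

-- ===== LEMMAS AND PROOFS =====

-- A's inner scan over indices equals the filtered zip (no match occurs at an index ≥ len szinlist)
theorem pv_inner_eq (c : List Int) :
    ∀ (cl : List (List Int)) (sl : List String) (acc : List String),
    (∀ j ∈ List.range cl.length, sl.length ≤ j → cl.getD j [] ≠ c) →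
    (List.range cl.length).foldl
      (fun a2 j => if c = cl.getD j [] then a2 ++ [sl.getD j ""] else a2) acc
    = acc ++ (List.filter (fun p => p.1 == c) (cl.zip sl)).map (fun p => p.2) := by
  intro cl
  induction cl with
  | nil => intro sl acc _; simp
  | cons a cl ih =>
    intro sl acc h
    cases sl with
    | nil =>
      have hconst : (List.range (a :: cl).length).foldl
          (fun a2 j => if c = (a :: cl).getD j [] then a2 ++ [([] : List String).getD j ""] else a2) acc
          = (List.range (a :: cl).length).foldl (fun a2 _ => a2) acc := by
        apply PySem.List.foldl_congr_mem
        intro a2 j hj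
        have hne := h j hj (by simp)
        exact if_neg (fun hc => hne hc.symm)
      rw [hconst, PySem.List.foldl_ignore]
      simp
    | cons s sl =>
      have h' : ∀ j ∈ List.range cl.length, sl.length ≤ j → cl.getD j [] ≠ c := by
        intro j hj hle
        have := h (j + 1) (by simp at hj ⊢; omega) (by simpa using Nat.succ_le_succ hle)
        simpa using this
      simp only [List.length_cons, List.range_succ_eq_map, List.foldl_cons, List.foldl_map,
        Nat.succ_eq_add_one, List.getD_cons_succ, List.getD_cons_zero]
      rw [ih sl _ h']
      by_cases hca : c = a
      · simp [List.zip_cons_cons, hca]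
      · simp [List.zip_cons_cons, hca, Ne.symm hca]

-- membership in coordlist agrees with membership among the zipped keys (no match beyond szinlist)
theorem pv_mem_zip_fst (cl : List (List Int)) (sl : List String) (c : List Int)
    (h : ∀ j ∈ List.range cl.length, sl.length ≤ j → cl.getD j [] ≠ c) :
    (c ∈ (cl.zip sl).map (fun p => p.1)) ↔ c ∈ cl := by
  constructor
  · intro hm
    rcases List.mem_map.mp hm with ⟨p, hp, hpc⟩
    exact hpc ▸ List.of_mem_zip hp |>.1
  · intro hm
    rcases List.getElem_of_mem hm with ⟨j, hj, hje⟩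
    have hjs : j < sl.length := by
      by_contra hge
      have hgetD : cl.getD j [] = c := by
        rw [List.getD_eq_getElem?_getD, List.getElem?_eq_getElem hj]; simpa using hje
      exact h j (List.mem_range.mpr hj) (by omega) hgetD
    have hz : j < (cl.zip sl).length := by simp [List.length_zip]; omega
    refine List.mem_map.mpr ⟨(cl.zip sl)[j]'hz, List.getElem_mem hz, ?_⟩
    simp [List.getElem_zip, hje]

-- one neighbor's contribution in A equals the filtered zip with ["n"] for an empty result
theorem pv_step_eq (cl : List (List Int)) (sl : List String) (c : List Int)
    (h : ∀ j ∈ List.range cl.length, sl.length ≤ j → cl.getD j [] ≠ c) :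
    ∀ (acc : List String),
    (if c ∈ cl then
        (List.range cl.length).foldl
          (fun a2 j => if c = cl.getD j [] then a2 ++ [sl.getD j ""] else a2) acc
      else acc ++ ["n"])
    = acc ++ (if (List.filter (fun p => p.1 == c) (cl.zip sl)).map (fun p => p.2) = []
              then ["n"]
              else (List.filter (fun p => p.1 == c) (cl.zip sl)).map (fun p => p.2)) := by
  intro acc
  by_cases hm : c ∈ cl
  · rw [if_pos hm, pv_inner_eq c cl sl acc h]
    have hne : (List.filter (fun p => p.1 == c) (cl.zip sl)).map (fun p => p.2) ≠ [] := by
      have hk : c ∈ (cl.zip sl).map (fun p => p.1) := (pv_mem_zip_fst cl sl c h).mpr hm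
      rcases List.mem_map.mp hk with ⟨p, hp, hpc⟩
      intro hnil
      have : p ∈ List.filter (fun p => p.1 == c) (cl.zip sl) :=
        List.mem_filter.mpr ⟨hp, by simp [hpc]⟩
      simp [List.map_eq_nil_iff.mp hnil] at this
    rw [if_neg hne]
  · rw [if_neg hm]
    have hnil : List.filter (fun p => p.1 == c) (cl.zip sl) = [] := by
      apply List.filter_eq_nil_iff.mpr
      intro p hp hpc
      exact hm (by simpa [beq_iff_eq.mp hpc] using (List.of_mem_zip hp).1)
    rw [hnil]
    simp

-- A's inner loop with Python range/indexing, rewritten over List.range / List.getD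
theorem pv_pyfold_to_range (cl : List (List Int)) (sl : List String) (c : List Int) (acc : List String) :
    (PySem.List.pyRange 0 (PySem.List.len cl)).foldl
      (fun a2 j => if c = PySem.List.pyGetD cl j [] then a2 ++ [PySem.List.pyGetD sl j ""] else a2) acc
    = (List.range cl.length).foldl
      (fun a2 j => if c = cl.getD j [] then a2 ++ [sl.getD j ""] else a2) acc := by
  rw [show PySem.List.len cl = (cl.length : Int) from rfl, PySem.List.pyRange_one]
  simp [List.foldl_map, PySem.List.pyGetD_natCast]

-- B's single bucket-dispatch pass, rewritten over List.range / List.getD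
theorem pv_bfold_to_range (cl : List (List Int)) (sl : List String) (n0 n1 n2 n3 : List Int)
    (b : List String × List String × List String × List String) :
    (PySem.List.pyRange 0 (PySem.List.len cl)).foldl (fun b j =>
      let c := PySem.List.pyGetD cl j []
      let s := PySem.List.pyGetD sl j ""
      if c = n0 then (b.1 ++ [s], b.2.1, b.2.2.1, b.2.2.2)
      else if c = n1 then (b.1, b.2.1 ++ [s], b.2.2.1, b.2.2.2)
      else if c = n2 then (b.1, b.2.1, b.2.2.1 ++ [s], b.2.2.2)
      else if c = n3 then (b.1, b.2.1, b.2.2.1, b.2.2.2 ++ [s])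
      else b) b
    = (List.range cl.length).foldl (fun b j =>
      let c := cl.getD j []
      let s := sl.getD j ""
      if c = n0 then (b.1 ++ [s], b.2.1, b.2.2.1, b.2.2.2)
      else if c = n1 then (b.1, b.2.1 ++ [s], b.2.2.1, b.2.2.2)
      else if c = n2 then (b.1, b.2.1, b.2.2.1 ++ [s], b.2.2.2)
      else if c = n3 then (b.1, b.2.1, b.2.2.1, b.2.2.2 ++ [s])
      else b) b := by
  rw [show PySem.List.len cl = (cl.length : Int) from rfl, PySem.List.pyRange_one]
  simp [List.foldl_map, PySem.List.pyGetD_natCast]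

-- the bucket pass collects, for each of the four pairwise-distinct targets, exactly the
-- filtered zip of colors (no match occurs at an index ≥ len szinlist)
theorem pv_buckets (n0 n1 n2 n3 : List Int)
    (h01 : n0 ≠ n1) (h02 : n0 ≠ n2) (h03 : n0 ≠ n3)
    (h12 : n1 ≠ n2) (h13 : n1 ≠ n3) (h23 : n2 ≠ n3) :
    ∀ (cl : List (List Int)) (sl : List String) (b0 b1 b2 b3 : List String),
    (∀ j ∈ List.range cl.length, sl.length ≤ j → cl.getD j [] ∉ [n0, n1, n2, n3]) →
    (List.range cl.length).foldl (fun b j =>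
      let c := cl.getD j []
      let s := sl.getD j ""
      if c = n0 then (b.1 ++ [s], b.2.1, b.2.2.1, b.2.2.2)
      else if c = n1 then (b.1, b.2.1 ++ [s], b.2.2.1, b.2.2.2)
      else if c = n2 then (b.1, b.2.1, b.2.2.1 ++ [s], b.2.2.2)
      else if c = n3 then (b.1, b.2.1, b.2.2.1, b.2.2.2 ++ [s])
      else b) (b0, b1, b2, b3)
    = (b0 ++ (List.filter (fun p => p.1 == n0) (cl.zip sl)).map (fun p => p.2),
       b1 ++ (List.filter (fun p => p.1 == n1) (cl.zip sl)).map (fun p => p.2),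
       b2 ++ (List.filter (fun p => p.1 == n2) (cl.zip sl)).map (fun p => p.2),
       b3 ++ (List.filter (fun p => p.1 == n3) (cl.zip sl)).map (fun p => p.2)) := by
  intro cl
  induction cl with
  | nil => intro sl b0 b1 b2 b3 _; simp
  | cons a cl ih =>
    intro sl b0 b1 b2 b3 h
    cases sl with
    | nil =>
      have hconst : ∀ j ∈ List.range (a :: cl).length,
          (a :: cl).getD j [] ∉ ([n0, n1, n2, n3] : List (List Int)) := fun j hj => h j hj (by simp)
      have : (List.range (a :: cl).length).foldl (fun (b : List String × List String × List String × List String) j =>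
          let c := (a :: cl).getD j []
          let s := ([] : List String).getD j ""
          if c = n0 then (b.1 ++ [s], b.2.1, b.2.2.1, b.2.2.2)
          else if c = n1 then (b.1, b.2.1 ++ [s], b.2.2.1, b.2.2.2)
          else if c = n2 then (b.1, b.2.1, b.2.2.1 ++ [s], b.2.2.2)
          else if c = n3 then (b.1, b.2.1, b.2.2.1, b.2.2.2 ++ [s])
          else b) (b0, b1, b2, b3)
          = (List.range (a :: cl).length).foldl (fun b _ => b) (b0, b1, b2, b3) := by
        apply PySem.List.foldl_congr_mem
        intro b j hj
        have hnm := hconst j hj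
        simp only [List.mem_cons, not_or] at hnm
        simp only [if_neg hnm.1, if_neg hnm.2.1, if_neg hnm.2.2.1, if_neg hnm.2.2.2.1]
      rw [this, PySem.List.foldl_ignore]
      simp
    | cons s sl =>
      have h' : ∀ j ∈ List.range cl.length, sl.length ≤ j → cl.getD j [] ∉ ([n0, n1, n2, n3] : List (List Int)) := by
        intro j hj hle
        have := h (j + 1) (by simp at hj ⊢; omega) (by simpa using Nat.succ_le_succ hle)
        simpa using this
      simp only [List.length_cons, List.range_succ_eq_map, List.foldl_cons, List.foldl_map,
        Nat.succ_eq_add_one, List.getD_cons_succ, List.getD_cons_zero]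
      by_cases ha0 : a = n0
      · rw [show (if a = n0 then ((b0 ++ [s], b1, b2, b3) : List String × List String × List String × List String)
              else if a = n1 then (b0, b1 ++ [s], b2, b3)
              else if a = n2 then (b0, b1, b2 ++ [s], b3)
              else if a = n3 then (b0, b1, b2, b3 ++ [s])
              else (b0, b1, b2, b3)) = (b0 ++ [s], b1, b2, b3) from if_pos ha0]
        rw [ih sl _ _ _ _ h']
        simp [List.zip_cons_cons, beq_iff_eq, ha0, h01, h02, h03]
      · by_cases ha1 : a = n1
        · rw [if_neg ha0, if_pos ha1, ih sl _ _ _ _ h']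
          simp [List.zip_cons_cons, beq_iff_eq, ha1, h12, h13, Ne.symm h01]
        · by_cases ha2 : a = n2
          · rw [if_neg ha0, if_neg ha1, if_pos ha2, ih sl _ _ _ _ h']
            simp [List.zip_cons_cons, beq_iff_eq, ha2, h23, Ne.symm h02, Ne.symm h12]
          · by_cases ha3 : a = n3
            · rw [if_neg ha0, if_neg ha1, if_neg ha2, if_pos ha3, ih sl _ _ _ _ h']
              simp [List.zip_cons_cons, beq_iff_eq, ha3, Ne.symm h03, Ne.symm h13, Ne.symm h23]
            · rw [if_neg ha0, if_neg ha1, if_neg ha2, if_neg ha3, ih sl _ _ _ _ h']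
              simp [List.zip_cons_cons, beq_iff_eq, ha0, ha1, ha2, ha3]

-- ===== VERDICT (by name: the statement is the Claim_ definition above) =====
theorem Coord_bealitas_spec : Claim_equal_Coord_bealitas := by
  intro cl sl coord hdom hpre
  obtain ⟨hlen, hno⟩ := hpre
  obtain ⟨c0, c1, r, rfl⟩ : ∃ c0 c1 r, coord = c0 :: c1 :: r := by
    match coord, hlen with
    | c0 :: c1 :: r, _ => exact ⟨c0, c1, r, rfl⟩
  have h0 : (PySem.List.pyGet? (c0 :: c1 :: r) 0).getD 0 = c0 := by
    simp [PySem.List.pyGet?, PySem.List.pyIdx?]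
    rw [if_pos (by omega)]; rfl
  have h1 : (PySem.List.pyGet? (c0 :: c1 :: r) 1).getD 0 = c1 := by
    simp [PySem.List.pyGet?, PySem.List.pyIdx?]
  have hnbrs : pvNbrs (c0 :: c1 :: r) = [[c0 + 1, c1], [c0, c1 + 1], [c0 - 1, c1], [c0, c1 - 1]] := by
    simp [pvNbrs]
  rw [hnbrs] at hno
  -- no-late-match condition, specialised to one neighbor
  have hone : ∀ c ∈ ([[c0 + 1, c1], [c0, c1 + 1], [c0 - 1, c1], [c0, c1 - 1]] : List (List Int)),
      ∀ j ∈ List.range cl.length, sl.length ≤ j → cl.getD j [] ≠ c := by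
    intro c hc j hj hle he
    exact hno j hj hle (he ▸ hc)
  unfold Spec_Coord_bealitas Coord_bealitas Coord_bealitas_alt
  simp only [h0, h1]
  refine congrArg (Prod.mk _) ?_
  -- A side: the outer loop over the 4 concrete neighbors, unfolded step by step
  rw [PySem.List.foldl_pyRange_zero_pyGetD _ ([] : List Int)
        (fun acc ci => if ci ∈ cl then
          (PySem.List.pyRange 0 (PySem.List.len cl)).foldl
            (fun acc2 j => if ci = PySem.List.pyGetD cl j [] then acc2 ++ [PySem.List.pyGetD sl j ""] else acc2) acc
        else acc ++ ["n"]) []]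
  simp only [List.foldl_cons, List.foldl_nil]
  rw [pv_pyfold_to_range, pv_pyfold_to_range, pv_pyfold_to_range, pv_pyfold_to_range]
  rw [pv_step_eq cl sl _ (hone _ (by simp)), pv_step_eq cl sl _ (hone _ (by simp)),
      pv_step_eq cl sl _ (hone _ (by simp)), pv_step_eq cl sl _ (hone _ (by simp))]
  -- B side: one bucket pass
  rw [pv_bfold_to_range]
  rw [pv_buckets [c0 + 1, c1] [c0, c1 + 1] [c0 - 1, c1] [c0, c1 - 1]
        (by intro he; simp only [List.cons.injEq, and_true] at he; omega) (by intro he; simp only [List.cons.injEq, and_true] at he; omega)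
        (by intro he; simp only [List.cons.injEq, and_true] at he; omega) (by intro he; simp only [List.cons.injEq, and_true] at he; omega)
        (by intro he; simp only [List.cons.injEq, and_true] at he; omega) (by intro he; simp only [List.cons.injEq, and_true] at he; omega)
        cl sl [] [] [] [] hno]
  simp only [List.append_assoc]
  rfl
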